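-- pv_equiv track=rewrite | github.com/josephroqueca/advent-of-code | 2020/day_20/python/day20.py | mark_sea_monster
-- ===== SOURCE A (Python) =====
-- sea_monster = [
--     ['-', '-', '-', '-', '-', '-', '-', '-', '-', '-', '-', '-', '-', '-', '-', '-', '-', '-', '#', '-'],
--     ['#', '-', '-', '-', '-', '#', '#', '-', '-', '-', '-', '#', '#', '-', '-', '-', '-', '#', '#', '#'],
--     ['-', '#', '-', '-', '#', '-', '-', '#', '-', '-', '#', '-', '-', '#', '-', '-', '#', '-', '-', '-'],
-- ]
--
-- sea_monster_height = len(sea_monster)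
--
-- sea_monster_width = len(sea_monster[0])
--
-- def mark_sea_monster(grid, x, y):
--     for xd in range(sea_monster_width):
--         for yd in range(sea_monster_height):
--             if sea_monster[yd][xd] != '-' and grid[y + yd][x + xd] != sea_monster[yd][xd]:
--                 return False
--     for xd in range(sea_monster_width):
--         for yd in range(sea_monster_height):
--             if sea_monster[yd][xd] == '#':
--                 grid[y + yd][x + xd] = 'O'
--     return True
-- ===== SOURCE B (Python) =====
-- # Recursive single-pass rewrite: instead of A's two staged nested-loop scans
-- # (check everything, then mark everything), B walks the 15 '#' offsets once with
-- # a recursion that checks on the way down and marks on the way back up, so a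
-- # mismatch anywhere unwinds with False before any cell has been mutated.
-- # Same in-place mutation of `grid` on success as A (same cells set to 'O').
-- SEA_MONSTER_OFFSETS = [  # '#' cells of the pattern, in A's column-major scan order
--     (0, 1), (1, 2), (4, 2), (5, 1), (6, 1), (7, 2), (10, 2), (11, 1),
--     (12, 1), (13, 2), (16, 2), (17, 1), (18, 0), (18, 1), (19, 1),
-- ]
--
-- def mark_sea_monster(grid, x, y):
--     def walk(i):
--         if i == len(SEA_MONSTER_OFFSETS):
--             return True
--         xd, yd = SEA_MONSTER_OFFSETS[i]
--         if grid[y + yd][x + xd] != '#':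
--             return False
--         if not walk(i + 1):
--             return False
--         grid[y + yd][x + xd] = 'O'
--         return True
--     return walk(0)
-- ===== Notes on version B (the rewrite author's own statement) =====
-- stated objective: alternative
-- what changed: A makes two staged nested-loop scans of the whole 3x20 pattern grid (check every cell with a per-cell guard, then a second full rescan to mark); B is a single recursive walk over the 15 '#' offsets that checks on the way down and marks on the way back up, so check and mark are fused into one pass and no staged rescan exists.
import Mathlib
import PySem

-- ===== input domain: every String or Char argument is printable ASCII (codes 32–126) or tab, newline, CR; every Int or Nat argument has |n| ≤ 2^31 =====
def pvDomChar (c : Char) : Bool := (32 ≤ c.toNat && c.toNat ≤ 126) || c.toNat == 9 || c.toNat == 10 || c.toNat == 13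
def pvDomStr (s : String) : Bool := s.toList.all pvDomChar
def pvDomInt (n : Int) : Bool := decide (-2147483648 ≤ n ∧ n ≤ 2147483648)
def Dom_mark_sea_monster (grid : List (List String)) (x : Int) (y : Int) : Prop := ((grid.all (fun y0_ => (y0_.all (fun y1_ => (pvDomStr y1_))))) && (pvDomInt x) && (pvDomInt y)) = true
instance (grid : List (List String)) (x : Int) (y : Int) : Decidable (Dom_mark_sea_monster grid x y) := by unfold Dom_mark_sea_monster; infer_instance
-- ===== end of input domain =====

-- B replaces A's two staged nested-loop scans of the 3×20 pattern grid by one recursive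
-- walk over the 15 '#' offsets that checks going down and marks while unwinding
-- (objective: alternative). Both Pythons mutate `grid` in place identically on success;
-- the equivalence proved here is about the return value only.

-- ===== PORT A =====
def pvSeaMonster : List (List String) :=
  [["-", "-", "-", "-", "-", "-", "-", "-", "-", "-", "-", "-", "-", "-", "-", "-", "-", "-", "#", "-"],
   ["#", "-", "-", "-", "-", "#", "#", "-", "-", "-", "-", "#", "#", "-", "-", "-", "-", "#", "#", "#"],
   ["-", "#", "-", "-", "#", "-", "-", "#", "-", "-", "#", "-", "-", "#", "-", "-", "#", "-", "-", "-"]]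

-- A's first double loop with its early `return False`; A's second (marking) loop only
-- mutates grid, so A's return value True is exactly the check loop finishing.
-- grid accesses use pyGetD; they are exact under Pre_ (every accessed cell in range).
def mark_sea_monster (grid : List (List String)) (x : Int) (y : Int) : Bool :=
  (PySem.List.pyRange 0 20 1).all (fun xd =>
    (PySem.List.pyRange 0 3 1).all (fun yd =>
      let pat := PySem.List.pyGetD (PySem.List.pyGetD pvSeaMonster yd []) xd ""
      if pat != "-" && PySem.List.pyGetD (PySem.List.pyGetD grid (y + yd) []) (x + xd) "" != pat
      then false else true))

-- ===== PORT B =====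
-- Source B's SEA_MONSTER_OFFSETS table, verbatim
def pvSeaMonsterOffsets : List (Int × Int) :=
  [(0, 1), (1, 2), (4, 2), (5, 1), (6, 1), (7, 2), (10, 2), (11, 1),
   (12, 1), (13, 2), (16, 2), (17, 1), (18, 0), (18, 1), (19, 1)]

-- Source B's inner `walk` recursion; the marking on the way back up only mutates grid,
-- so the return value is: false at the first mismatch, else walk of the rest.
def pvWalk (grid : List (List String)) (x : Int) (y : Int) : List (Int × Int) → Bool
  | [] => true
  | p :: rest =>
      if PySem.List.pyGetD (PySem.List.pyGetD grid (y + p.2) []) (x + p.1) "" != "#"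
      then false
      else pvWalk grid x y rest

def mark_sea_monster_alt (grid : List (List String)) (x : Int) (y : Int) : Bool :=
  pvWalk grid x y pvSeaMonsterOffsets

-- ===== PRECONDITION & SPEC =====
-- "the grid cell at offset p is a valid Python index pair" (negative indices wrap)
def pvAccessOk (grid : List (List String)) (x : Int) (y : Int) (p : Int × Int) : Prop :=
  PySem.Raise.InRange grid.length (y + p.2) ∧
  PySem.Raise.InRange (PySem.List.pyGetD grid (y + p.2) []).length (x + p.1)

-- Pre_ excludes exactly the inputs on which Python A (and B, which visits the '#'
-- offsets in the same order) raises IndexError: an out-of-range '#' offset reached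
-- before any mismatched '#' cell stops the scan with False.
def Pre_mark_sea_monster (grid : List (List String)) (x : Int) (y : Int) : Prop :=
  ∀ k : Nat, k < pvSeaMonsterOffsets.length →
    (∀ j : Nat, j < k →
      pvAccessOk grid x y (pvSeaMonsterOffsets.getD j (0, 0)) ∧
      PySem.List.pyGetD (PySem.List.pyGetD grid (y + (pvSeaMonsterOffsets.getD j (0, 0)).2) [])
        (x + (pvSeaMonsterOffsets.getD j (0, 0)).1) "" = "#") →
    pvAccessOk grid x y (pvSeaMonsterOffsets.getD k (0, 0))
instance (grid : List (List String)) (x : Int) (y : Int) : Decidable (Pre_mark_sea_monster grid x y) := by unfold Pre_mark_sea_monster pvAccessOk; infer_instance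

def pvWitness_mark_sea_monster : List (List String) × Int × Int :=
  ([[".", ".", ".", ".", ".", ".", ".", ".", ".", ".", ".", ".", ".", ".", ".", ".", ".", ".", "#", "."],
    [".", ".", ".", ".", ".", ".", ".", ".", ".", ".", ".", ".", ".", ".", ".", ".", ".", ".", ".", "."],
    [".", ".", ".", ".", ".", ".", ".", ".", ".", ".", ".", ".", ".", ".", ".", ".", ".", ".", ".", "."]], 0, 0)

def Spec_mark_sea_monster (grid : List (List String)) (x : Int) (y : Int) (out : Bool) : Prop := out = mark_sea_monster_alt grid x y
instance (grid : List (List String)) (x : Int) (y : Int) (out : Bool) : Decidable (Spec_mark_sea_monster grid x y out) := by unfold Spec_mark_sea_monster; infer_instance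

-- ===== CLAIM (what is proved, stated in full; the proofs are below) =====
def Claim_equal_mark_sea_monster : Prop := ∀ (grid : List (List String)) (x : Int) (y : Int), Dom_mark_sea_monster grid x y → Pre_mark_sea_monster grid x y → Spec_mark_sea_monster grid x y (mark_sea_monster grid x y)

-- ===== LEMMAS AND PROOFS =====

-- Source B's recursion returns true iff every offset in the list reads "#"
theorem pvWalk_eq_all (grid : List (List String)) (x y : Int) (l : List (Int × Int)) :
    pvWalk grid x y l =
      l.all (fun p => PySem.List.pyGetD (PySem.List.pyGetD grid (y + p.2) []) (x + p.1) "" == "#") := by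
  induction l with
  | nil => rfl
  | cons p rest ih =>
    simp only [pvWalk, List.all_cons, ih]
    by_cases h : PySem.List.pyGetD (PySem.List.pyGetD grid (y + p.2) []) (x + p.1) "" = "#" <;>
      simp [h]

-- the offsets table is exactly the '#' cells of the pattern, in A's column-major order
theorem offsets_char :
    ∀ p ∈ pvSeaMonsterOffsets,
      PySem.List.pyGetD (PySem.List.pyGetD pvSeaMonster p.2 []) p.1 "" = "#" := by decide

-- the ports even agree on all of Dom (out of range both total forms read the default ""
-- and both sides see "" ≠ "#"): A = true iff every pattern cell is '-' or matches,
-- B = true iff every '#' offset reads "#"; pointwise equivalent because every pattern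
-- cell is '-' or '#' and the offsets table enumerates exactly the '#' cells.
theorem mark_sea_monster_eq_alt (grid : List (List String)) (x y : Int) :
    mark_sea_monster grid x y = mark_sea_monster_alt grid x y := by
  have hcover : ∀ xd ∈ PySem.List.pyRange 0 20 1, ∀ yd ∈ PySem.List.pyRange 0 3 1,
      PySem.List.pyGetD (PySem.List.pyGetD pvSeaMonster yd []) xd "" = "-" ∨
      (xd, yd) ∈ pvSeaMonsterOffsets := by decide
  unfold mark_sea_monster mark_sea_monster_alt
  rw [pvWalk_eq_all, Bool.eq_iff_iff]
  simp only [List.all_eq_true]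
  constructor
  · intro h p hp
    have hpat := offsets_char p hp
    have hmem : p.1 ∈ PySem.List.pyRange 0 20 1 ∧ p.2 ∈ PySem.List.pyRange 0 3 1 := by
      fin_cases hp <;> decide
    have hA := h p.1 hmem.1 p.2 hmem.2
    rw [hpat] at hA
    simp at hA ⊢
    exact hA
  · intro h xd hxd yd hyd
    rcases hcover xd hxd yd hyd with hm | hm
    · simp [hm]
    · have hB := h (xd, yd) hm
      have hpat := offsets_char (xd, yd) hm
      simp at hB
      simp [hpat, hB]

-- ===== VERDICT (by name: the statement is the Claim_ definition above) =====
theorem mark_sea_monster_spec : Claim_equal_mark_sea_monster := by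
  intro grid x y _ _
  unfold Spec_mark_sea_monster
  exact mark_sea_monster_eq_alt grid x y
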